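-- pv_equiv track=rewrite | github.com/promptdriven/pdd | experiments/grounding/results/llm_invoke_opus_rerun_generations/llm_invoke_grounded_run4.py | _is_malformed_json_response
-- ===== SOURCE A (Python) =====
-- from typing import Any, Dict, List, Optional, Tuple, Type, Union
--
-- def _is_malformed_json_response(content: Any, threshold: int = 100) -> bool:
--     if not content or not isinstance(content, str):
--         return False
--     stripped = content.strip()
--     if not stripped.startswith("{"):
--         return False
--     if stripped.endswith("}"):
--         return False
--     count = 0
--     check = stripped
--     while check.endswith("\\n"):
--         count += 1
--         check = check[:-2]
--     if count >= threshold: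
--         return True
--     if stripped.endswith("\\"):
--         return True
--     return False
-- ===== SOURCE B (Python) =====
-- def _is_malformed_json_response(content, threshold: int = 100) -> bool:
--     if not content or not isinstance(content, str):
--         return False
--     stripped = content.strip()
--     if not stripped.startswith("{"):
--         return False
--     if stripped.endswith("}"):
--         return False
--     # count >= threshold  <=>  the suffix is at least `threshold` copies of "\n" (backslash+n)
--     return stripped.endswith("\\n" * threshold) or stripped.endswith("\\")
-- ===== Notes on version B (the rewrite author's own statement) =====
-- stated objective: simpler
-- what changed: The while-loop that repeatedly slices off trailing backslash-n escape pairs and counts them is replaced by a single suffix test against the escape pair repeated threshold times; the guard clauses stay.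
import Mathlib
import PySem

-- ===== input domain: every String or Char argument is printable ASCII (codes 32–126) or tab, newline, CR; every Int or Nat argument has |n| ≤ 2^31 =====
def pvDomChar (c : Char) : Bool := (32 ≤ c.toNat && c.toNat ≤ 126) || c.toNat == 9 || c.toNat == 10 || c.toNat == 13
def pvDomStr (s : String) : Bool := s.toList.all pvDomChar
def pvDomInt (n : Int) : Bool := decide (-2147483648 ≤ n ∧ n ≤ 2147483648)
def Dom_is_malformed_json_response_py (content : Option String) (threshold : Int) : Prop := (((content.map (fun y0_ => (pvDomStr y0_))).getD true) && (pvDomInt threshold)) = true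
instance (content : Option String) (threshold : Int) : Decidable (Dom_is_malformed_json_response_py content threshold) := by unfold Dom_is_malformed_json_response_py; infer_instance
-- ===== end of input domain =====

-- B replaces A's while-loop counting trailing backslash-n escape pairs by one
-- closed-form suffix test against the pair repeated threshold times; simpler, same value.


-- ===== PORT A =====
-- termination helper for the while-loop: slicing off the matched 2-char suffix shrinks the string
theorem pvTrailDec (cs : List Char) (h : PySem.Chars.endswith cs ['\\', 'n'] = true) :
    (PySem.Chars.slice cs none (some (-2))).length < cs.length := by
  have hs := (PySem.Chars.endswith_iff cs ['\\', 'n']).mp h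
  have hlen : 2 ≤ cs.length := by
    have := hs.length_le; simpa using this
  rw [PySem.Chars.slice_eq_listSlice, PySem.List.slice_to_neg_ofNat cs 2 (by omega)]
  simp; omega

-- while check.endswith("\n"): count += 1; check = check[:-2]
def pvCountTrail (check : List Char) (count : Int) : Int :=
  if h : PySem.Chars.endswith check ['\\', 'n'] = true then
    pvCountTrail (PySem.Chars.slice check none (some (-2))) (count + 1)
  else count
termination_by check.length
decreasing_by exact pvTrailDec check h

def is_malformed_json_response_py (content : Option String) (threshold : Int) : Bool :=
  match content with
  | none => false
  | some s =>
    if s = "" then false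
    else
      let stripped := PySem.Str.strip s
      if ¬ (PySem.Str.startswith stripped "{" = true) then false
      else if PySem.Str.endswith stripped "}" then false
      else
        let count := pvCountTrail stripped.toList 0
        if threshold ≤ count then true
        else if PySem.Str.endswith stripped "\\" then true
        else false

-- ===== PORT B =====
def is_malformed_json_response_py_alt (content : Option String) (threshold : Int) : Bool :=
  match content with
  | none => false
  | some s =>
    if s = "" then false
    else
      let stripped := PySem.Str.strip s
      if ¬ (PySem.Str.startswith stripped "{" = true) then false
      else if PySem.Str.endswith stripped "}" then false
      else
        -- stripped.endswith("\\n" * threshold) or stripped.endswith("\\")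
        PySem.Chars.endswith stripped.toList (PySem.List.pyRepeat ['\\', 'n'] threshold)
          || PySem.Str.endswith stripped "\\"

-- ===== PRECONDITION & SPEC =====
def Spec_is_malformed_json_response_py (content : Option String) (threshold : Int) (out : Bool) : Prop := out = is_malformed_json_response_py_alt content threshold
instance (content : Option String) (threshold : Int) (out : Bool) : Decidable (Spec_is_malformed_json_response_py content threshold out) := by unfold Spec_is_malformed_json_response_py; infer_instance

-- ===== CLAIM (what is proved, stated in full; the proofs are below) =====
def Claim_equal_is_malformed_json_response_py : Prop := ∀ (content : Option String) (threshold : Int), Dom_is_malformed_json_response_py content threshold → Spec_is_malformed_json_response_py content threshold (is_malformed_json_response_py content threshold)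

-- ===== LEMMAS AND PROOFS =====

-- pyRepeat of a nonpositive count is empty
theorem pvRepeat_nonpos (p : List Char) (t : Int) (h : t ≤ 0) :
    PySem.List.pyRepeat p t = [] := by
  simp [PySem.List.pyRepeat]
  omega

theorem pvRepeat_pos (p : List Char) (t : Int) (h : 0 < t) :
    PySem.List.pyRepeat p t = PySem.List.pyRepeat p (t - 1) ++ p := by
  simp only [PySem.List.pyRepeat]
  have h1 : t.toNat = (t - 1).toNat + 1 := by omega
  rw [h1, List.replicate_succ']
  simp

-- cancelling a common suffix
theorem pvSuffix_cancel (x p cs' : List Char) :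
    (x ++ p) <:+ (cs' ++ p) ↔ x <:+ cs' := by
  constructor
  · rintro ⟨u, hu⟩
    exact ⟨u, by
      have : (u ++ x) ++ p = cs' ++ p := by simpa [List.append_assoc] using hu
      exact List.append_cancel_right this⟩
  · rintro ⟨u, hu⟩
    exact ⟨u, by simp [← hu, List.append_assoc]⟩

-- the key characterisation: the loop's count reaches t iff the string ends in (t - count) copies of "\n"
theorem pvCountTrail_iff (check : List Char) (count t : Int) :
    (t ≤ pvCountTrail check count) ↔
      PySem.Chars.endswith check (PySem.List.pyRepeat ['\\', 'n'] (t - count)) = true := by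
  induction check, count using pvCountTrail.induct with
  | case1 check count h ih =>
    rw [pvCountTrail, dif_pos h]
    rw [ih]
    by_cases ht : t - count ≤ 0
    · have h1 : PySem.List.pyRepeat ['\\', 'n'] (t - count) = [] := pvRepeat_nonpos _ _ ht
      have h2 : PySem.List.pyRepeat ['\\', 'n'] (t - (count + 1)) = [] := pvRepeat_nonpos _ _ (by omega)
      simp [h1, h2, PySem.Chars.endswith_iff]
    · have hs := (PySem.Chars.endswith_iff check ['\\', 'n']).mp h
      obtain ⟨cs', hcs'⟩ := hs
      have h1 : PySem.List.pyRepeat ['\\', 'n'] (t - count)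
          = PySem.List.pyRepeat ['\\', 'n'] (t - (count + 1)) ++ ['\\', 'n'] := by
        rw [pvRepeat_pos _ _ (by omega)]; ring_nf
      have hslice : PySem.Chars.slice check none (some (-2)) = cs' := by
        rw [PySem.Chars.slice_eq_listSlice, PySem.List.slice_to_neg_ofNat check 2 (by omega)]
        rw [← hcs']
        simp
      rw [hslice, h1, PySem.Chars.endswith_iff, PySem.Chars.endswith_iff, ← hcs',
        pvSuffix_cancel]
  | case2 check count h =>
    rw [pvCountTrail, dif_neg h]
    by_cases ht : t - count ≤ 0
    · have h1 : PySem.List.pyRepeat ['\\', 'n'] (t - count) = [] := pvRepeat_nonpos _ _ ht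
      simp [h1, PySem.Chars.endswith_iff]
      omega
    · have h1 := pvRepeat_pos ['\\', 'n'] (t - count) (by omega)
      constructor
      · intro hle; omega
      · intro hend
        exfalso
        apply h
        rw [PySem.Chars.endswith_iff] at hend ⊢
        rw [h1] at hend
        obtain ⟨u, hu⟩ := hend
        exact ⟨u ++ PySem.List.pyRepeat ['\\', 'n'] (t - count - 1), by simp [← hu, List.append_assoc]⟩

-- ===== VERDICT (by name: the statement is the Claim_ definition above) =====
theorem is_malformed_json_response_py_spec : Claim_equal_is_malformed_json_response_py := by
  intro content threshold _
  unfold Spec_is_malformed_json_response_py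
  unfold is_malformed_json_response_py is_malformed_json_response_py_alt
  match content with
  | none => rfl
  | some s =>
    by_cases hs : s = ""
    · simp [hs]
    · simp only [hs, if_false]
      split_ifs with h1 h2 h3 h4 <;> try rfl
      · -- A returns true via the count: B's first disjunct is true
        have hend := (pvCountTrail_iff (PySem.Str.strip s).toList 0 threshold).mp h3
        simp only [sub_zero] at hend
        simp only [PySem.Str.toList_strip] at hend
        simp [hend]
      · -- A returns true via the backslash check
        have h4' : PySem.Chars.endswith (PySem.Chars.strip s.toList) ['\\'] = true := by
          simpa using h4
        simp [h4']
      · -- A returns false: neither disjunct of B holds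
        have hnot : PySem.Chars.endswith (PySem.Str.strip s).toList
            (PySem.List.pyRepeat ['\\', 'n'] threshold) = false := by
          by_contra hc
          have hc' : PySem.Chars.endswith (PySem.Str.strip s).toList
              (PySem.List.pyRepeat ['\\', 'n'] threshold) = true := by
            revert hc; cases PySem.Chars.endswith (PySem.Str.strip s).toList
              (PySem.List.pyRepeat ['\\', 'n'] threshold) <;> simp
          have := (pvCountTrail_iff (PySem.Str.strip s).toList 0 threshold).mpr
            (by simpa using hc')
          omega
        simp only [PySem.Str.toList_strip] at hnot
        have h4' : PySem.Chars.endswith (PySem.Chars.strip s.toList) ['\\'] = false := by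
          simpa using h4
        simp [hnot, h4']
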